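-- pv_equiv track=rewrite | github.com/gamendez98/analisis-algoritmos | Project/game_theory.py | renumber_communities
-- ===== SOURCE A (Python) =====
-- from collections import defaultdict
--
-- def renumber_communities(partition):
--     """Renumber community IDs to be consecutive integers starting from 0."""
--     communities = defaultdict(list)
--     for node, comm in partition.items():
--         communities[comm].append(node)
--
--     new_partition = {}
--     for new_id, (_, nodes) in enumerate(communities.items()):
--         for node in nodes:
--             new_partition[node] = new_id
--     return new_partition
-- ===== SOURCE B (Python) =====
-- def renumber_communities(partition):
--     """Renumber community IDs to be consecutive integers starting from 0."""
--     comm_order = dict.fromkeys(partition.values())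
--     return {node: new_id
--             for new_id, comm in enumerate(comm_order)
--             for node, c in partition.items() if c == comm}
-- ===== Notes on version B (the rewrite author's own statement) =====
-- stated objective: simpler
-- what changed: Replaces the defaultdict grouping of nodes into per-community lists with an ordered dedup of the community ids followed by one dict comprehension that filters the items per community; no intermediate node lists are built (trades O(n) for O(n*k) scans).
import Mathlib
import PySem

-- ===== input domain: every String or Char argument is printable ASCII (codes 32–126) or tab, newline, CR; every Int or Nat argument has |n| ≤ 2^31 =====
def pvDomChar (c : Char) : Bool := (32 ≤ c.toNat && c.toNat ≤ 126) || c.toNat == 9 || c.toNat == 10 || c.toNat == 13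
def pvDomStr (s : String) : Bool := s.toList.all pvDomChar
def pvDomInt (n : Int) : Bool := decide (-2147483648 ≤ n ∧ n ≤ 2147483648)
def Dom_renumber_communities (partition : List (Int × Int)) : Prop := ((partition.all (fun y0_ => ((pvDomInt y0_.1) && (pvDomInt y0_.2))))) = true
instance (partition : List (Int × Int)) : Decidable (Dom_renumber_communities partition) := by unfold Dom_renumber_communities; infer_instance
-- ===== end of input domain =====

-- B replaces A's defaultdict grouping into per-community node lists by an ordered dedup of the
-- community ids plus one dict comprehension filtering the items per community (simpler decomposition).

-- ===== PORT A =====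
def renumber_communities (partition : List (Int × Int)) : List (Int × Int) :=
  -- communities = defaultdict(list); for node, comm in partition.items(): communities[comm].append(node)
  let communities : PySem.Dict Int (List Int) :=
    partition.foldl (fun d p => d.modify p.2 [] (fun l => l ++ [p.1])) PySem.Dict.empty
  -- for new_id, (_, nodes) in enumerate(communities.items()): for node in nodes: new_partition[node] = new_id
  let new_partition : PySem.Dict Int Int :=
    (PySem.List.enumerate communities.items).foldl
      (fun np e => e.2.2.foldl (fun np node => np.insert node e.1) np) PySem.Dict.empty
  new_partition.items

-- ===== PORT B =====
def renumber_communities_alt (partition : List (Int × Int)) : List (Int × Int) :=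
  -- comm_order = dict.fromkeys(partition.values())
  let comm_order : List Int := PySem.List.dedup (partition.map (fun p => p.2))
  -- {node: new_id for new_id, comm in enumerate(comm_order) for node, c in partition.items() if c == comm}
  ((PySem.List.enumerate comm_order).foldl
      (fun np e => (partition.filter (fun p => p.2 == e.2)).foldl
          (fun np p => np.insert p.1 e.1) np) PySem.Dict.empty).items

-- ===== PRECONDITION & SPEC =====
def Spec_renumber_communities (partition : List (Int × Int)) (out : List (Int × Int)) : Prop := out = renumber_communities_alt partition
instance (partition : List (Int × Int)) (out : List (Int × Int)) : Decidable (Spec_renumber_communities partition out) := by unfold Spec_renumber_communities; infer_instance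

-- ===== CLAIM (what is proved, stated in full; the proofs are below) =====
def Claim_equal_renumber_communities : Prop := ∀ (partition : List (Int × Int)), Dom_renumber_communities partition → Spec_renumber_communities partition (renumber_communities partition)

-- ===== LEMMAS AND PROOFS =====

-- A's grouping dict, read back as items: distinct communities in first-appearance order,
-- each paired with the nodes of that community in input order.
lemma communities_items (partition : List (Int × Int)) :
    (partition.foldl (fun d p => d.modify p.2 [] (fun l => l ++ [p.1]))
        (PySem.Dict.empty : PySem.Dict Int (List Int))).items
    = (PySem.List.dedup (partition.map (fun p => p.2))).map
        (fun c => (c, (partition.filter (fun p => p.2 == c)).map (fun p => p.1))) := by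
  have hswap : partition.foldl (fun d p => d.modify p.2 [] (fun l => l ++ [p.1]))
        (PySem.Dict.empty : PySem.Dict Int (List Int))
      = (partition.map (fun p => (p.2, p.1))).foldl
        (fun d q => d.modify q.1 [] (fun l => l ++ [q.2])) PySem.Dict.empty := by
    rw [List.foldl_map]
  rw [hswap]
  set D := (partition.map (fun p => (p.2, p.1))).foldl
        (fun d q => d.modify q.1 [] (fun l => l ++ [q.2])) (PySem.Dict.empty : PySem.Dict Int (List Int)) with hD
  have hnd : D.keys.Nodup := by
    rw [hD]
    exact PySem.Dict.nodup_keys_foldl_modify_key (partition.map (fun p => (p.2, p.1)))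
      (fun q : Int × Int => q.1) [] (fun d q => (· ++ [q.2])) _ PySem.Dict.nodup_keys_empty
  have hkeys : D.keys = PySem.List.dedup (partition.map (fun p => p.2)) := by
    rw [hD, PySem.Dict.keys_foldl_modify_key]
    simp [PySem.Set.update_nil_left, PySem.Dict.keys_empty, List.map_map, Function.comp_def]
  have hget : ∀ c, D.getD c [] = (partition.filter (fun p => p.2 == c)).map (fun p => p.1) := by
    intro c
    rw [hD, PySem.Dict.getD_foldl_modify_append]
    simp [PySem.Dict.getD_empty, List.filter_map, List.map_map, Function.comp_def]
  rw [PySem.Dict.items_eq_map_keys D hnd ([] : List Int), hkeys]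
  exact List.map_congr_left (fun c _ => by rw [hget c])

-- the enumerate-fold over A's grouped items equals B's enumerate-fold with per-community filters
lemma enum_fold_eq (partition : List (Int × Int)) :
    ∀ (l : List Int) (s : Int) (np : PySem.Dict Int Int),
    (PySem.List.enumerate (l.map
        (fun c => (c, (partition.filter (fun p => p.2 == c)).map (fun p => p.1)))) s).foldl
      (fun np e => e.2.2.foldl (fun np node => np.insert node e.1) np) np
    = (PySem.List.enumerate l s).foldl
      (fun np e => (partition.filter (fun p => p.2 == e.2)).foldl
          (fun np p => np.insert p.1 e.1) np) np := by
  intro l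
  induction l with
  | nil => intro s np; simp [PySem.List.enumerate_nil]
  | cons c t ih =>
    intro s np
    simp only [List.map_cons, PySem.List.enumerate_cons, List.foldl_cons, List.foldl_map, ih]

-- ===== VERDICT (by name: the statement is the Claim_ definition above) =====
theorem renumber_communities_spec : Claim_equal_renumber_communities := by
  intro partition _
  unfold Spec_renumber_communities renumber_communities renumber_communities_alt
  simp only [communities_items, enum_fold_eq]
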